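-- pv_equiv track=rewrite | github.com/tudorgroza/fast_hpo_cr | pypi/FastHPOCR/FastHPOCR/cr/TextSplitter.py | splitSpecial
-- ===== SOURCE A (Python) =====
-- def splitSpecial(word):
--     splitWord = []
--     current = ''
--     for el in word:
--         if el.isalnum():
--             current += el
--         else:
--             if current:
--                 splitWord.append(current)
--             current = ''
--             splitWord.append(el)
--     if current:
--         splitWord.append(current)
--     return splitWord
-- ===== SOURCE B (Python) =====
-- def splitSpecial(word):
--     out = []
--     rest = word
--     while rest:
--         k = rest[0].isalnum()
--         j = 1
--         while j < len(rest) and rest[j].isalnum() == k: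
--             j += 1
--         run, rest = rest[:j], rest[j:]
--         if k:
--             out.append(run)
--         else:
--             out.extend(run)
--     return out
-- ===== Notes on version B (the rewrite author's own statement) =====
-- stated objective: alternative
-- what changed: B partitions the string into maximal same-kind runs with an inner span scan (take a whole run per outer step, then append the run or extend with its characters), instead of A's per-character accumulator with flush-at-boundary logic.
import Mathlib
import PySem

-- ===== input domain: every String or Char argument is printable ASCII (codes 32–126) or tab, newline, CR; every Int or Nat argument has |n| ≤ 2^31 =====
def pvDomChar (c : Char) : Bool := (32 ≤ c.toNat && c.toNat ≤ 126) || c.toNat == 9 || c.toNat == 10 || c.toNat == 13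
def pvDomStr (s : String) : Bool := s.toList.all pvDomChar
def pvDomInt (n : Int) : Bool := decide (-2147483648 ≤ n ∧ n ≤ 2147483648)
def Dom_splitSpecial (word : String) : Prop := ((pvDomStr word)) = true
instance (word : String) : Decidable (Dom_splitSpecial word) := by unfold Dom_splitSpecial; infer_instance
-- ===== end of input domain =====

-- B replaces A's per-character accumulator/flush loop by a run-at-a-time span scan (alternative decomposition, same cost).

-- ===== PORT A =====
-- state: (splitWord, current); current kept as List Char, turned into a String exactly where A appends it
def pvStepA (st : List String × List Char) (c : Char) : List String × List Char :=
  if PySem.Chars.isalnum c then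
    (st.1, st.2 ++ [c])
  else
    ((if st.2 ≠ [] then st.1 ++ [String.ofList st.2] else st.1) ++ [String.ofList [c]], [])

def splitSpecial (word : String) : List String :=
  let st := word.toList.foldl pvStepA ([], [])
  if st.2 ≠ [] then st.1 ++ [String.ofList st.2] else st.1

-- ===== PORT B =====
-- one outer step per run: inner 'while' advancing over equal isalnum-keys = takeWhile/dropWhile
def pvSplitRuns : List Char → List String
  | [] => []
  | c :: cs =>
    let k := PySem.Chars.isalnum c
    let run := c :: cs.takeWhile (fun d => PySem.Chars.isalnum d == k)
    let rest := cs.dropWhile (fun d => PySem.Chars.isalnum d == k)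
    (if k then [String.ofList run] else run.map (fun d => String.ofList [d])) ++ pvSplitRuns rest
  termination_by cs => cs.length
  decreasing_by
    have := List.length_dropWhile_le (p := fun d => PySem.Chars.isalnum d == PySem.Chars.isalnum c) (l := cs)
    simpa using Nat.lt_succ_of_le this

def splitSpecial_alt (word : String) : List String :=
  pvSplitRuns word.toList

-- ===== PRECONDITION & SPEC =====
def Spec_splitSpecial (word : String) (out : List String) : Prop := out = splitSpecial_alt word
instance (word : String) (out : List String) : Decidable (Spec_splitSpecial word out) := by unfold Spec_splitSpecial; infer_instance

-- ===== CLAIM (what is proved, stated in full; the proofs are below) =====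
def Claim_equal_splitSpecial : Prop := ∀ (word : String), Dom_splitSpecial word → Spec_splitSpecial word (splitSpecial word)

-- ===== LEMMAS AND PROOFS =====

theorem pvSplitRuns_nil : pvSplitRuns [] = [] := by rw [pvSplitRuns]

theorem pvSplitRuns_cons (c : Char) (cs : List Char) :
    pvSplitRuns (c :: cs) =
      (if PySem.Chars.isalnum c then
          [String.ofList (c :: cs.takeWhile (fun d => PySem.Chars.isalnum d == PySem.Chars.isalnum c))]
        else (c :: cs.takeWhile (fun d => PySem.Chars.isalnum d == PySem.Chars.isalnum c)).map
              (fun d => String.ofList [d])) ++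
        pvSplitRuns (cs.dropWhile (fun d => PySem.Chars.isalnum d == PySem.Chars.isalnum c)) := by
  rw [pvSplitRuns]

-- leading non-alnum chars are emitted as singletons
theorem pvSplitRuns_nonalnum_prefix (cs : List Char) :
    (cs.takeWhile (fun d => !PySem.Chars.isalnum d)).map (fun d => String.ofList [d]) ++
      pvSplitRuns (cs.dropWhile (fun d => !PySem.Chars.isalnum d)) = pvSplitRuns cs := by
  cases cs with
  | nil => simp [pvSplitRuns_nil]
  | cons c cs =>
    by_cases h : PySem.Chars.isalnum c = true
    · simp [h]
    · rw [Bool.not_eq_true] at h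
      rw [pvSplitRuns_cons]
      simp [h]

def pvFinishA (st : List String × List Char) : List String :=
  if st.2 ≠ [] then st.1 ++ [String.ofList st.2] else st.1

def pvEmit (cur : List Char) (cs : List Char) : List String :=
  if cur = [] then pvSplitRuns cs
  else String.ofList (cur ++ cs.takeWhile (fun d => PySem.Chars.isalnum d)) ::
        pvSplitRuns (cs.dropWhile (fun d => PySem.Chars.isalnum d))

theorem pvMain (cs : List Char) : ∀ (acc : List String) (cur : List Char),
    pvFinishA (cs.foldl pvStepA (acc, cur)) = acc ++ pvEmit cur cs := by
  induction cs with
  | nil =>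
    intro acc cur
    by_cases h : cur = [] <;> simp [pvFinishA, pvEmit, pvSplitRuns_nil, h]
  | cons c cs ih =>
    intro acc cur
    by_cases h : PySem.Chars.isalnum c = true
    · rw [List.foldl_cons, pvStepA, if_pos h, ih]
      have hp : (fun d => PySem.Chars.isalnum d == PySem.Chars.isalnum c) =
          (fun d => PySem.Chars.isalnum d) := by
        funext d; simp [h]
      by_cases hc : cur = []
      · subst hc
        simp only [pvEmit]
        rw [pvSplitRuns_cons]
        simp [h]
      · simp [pvEmit, hc, h]
    · rw [Bool.not_eq_true] at h
      rw [List.foldl_cons, pvStepA]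
      simp only [h, Bool.false_eq_true, if_false]
      rw [ih]
      have hkey : pvSplitRuns (c :: cs) = String.ofList [c] :: pvSplitRuns cs := by
        rw [pvSplitRuns_cons]
        have hp : (fun d => PySem.Chars.isalnum d == PySem.Chars.isalnum c) =
            (fun d => !PySem.Chars.isalnum d) := by
          funext d; cases hd : PySem.Chars.isalnum d <;> simp [h]
        rw [hp, ← pvSplitRuns_nonalnum_prefix cs]
        simp [h]
      by_cases hc : cur = []
      · subst hc
        simp [pvEmit, hkey]
      · simp [pvEmit, hc, h, hkey]

-- ===== VERDICT (by name: the statement is the Claim_ definition above) =====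
theorem splitSpecial_spec : Claim_equal_splitSpecial := by
  intro word _
  show splitSpecial word = splitSpecial_alt word
  unfold splitSpecial splitSpecial_alt
  have := pvMain word.toList [] []
  simpa [pvFinishA, pvEmit] using this
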